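-- pv_equiv track=rewrite | github.com/MrBrantCode/unitest_baseline | mut_generate/mist_train_taco/taco_16090/solution.py | find_polynomial_degree
-- ===== SOURCE A (Python) =====
-- def find_polynomial_degree(coefficients):
--     reduce = 0
--     for i in range(len(coefficients)):
--         if coefficients[-1 - i] == 0:
--             reduce += 1
--         else:
--             break
--     return len(coefficients) - 1 - reduce
-- ===== SOURCE B (Python) =====
-- def find_polynomial_degree(coefficients):
--     degree = -1
--     for i, c in enumerate(coefficients):
--         if c != 0:
--             degree = i
--     return degree
-- ===== Notes on version B (the rewrite author's own statement) =====
-- stated objective: simpler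
-- what changed: B replaces A's back-to-front negative-index trailing-zero counter and len-1-reduce subtraction with a single forward scan over enumerate that remembers the last non-zero index.
import Mathlib
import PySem

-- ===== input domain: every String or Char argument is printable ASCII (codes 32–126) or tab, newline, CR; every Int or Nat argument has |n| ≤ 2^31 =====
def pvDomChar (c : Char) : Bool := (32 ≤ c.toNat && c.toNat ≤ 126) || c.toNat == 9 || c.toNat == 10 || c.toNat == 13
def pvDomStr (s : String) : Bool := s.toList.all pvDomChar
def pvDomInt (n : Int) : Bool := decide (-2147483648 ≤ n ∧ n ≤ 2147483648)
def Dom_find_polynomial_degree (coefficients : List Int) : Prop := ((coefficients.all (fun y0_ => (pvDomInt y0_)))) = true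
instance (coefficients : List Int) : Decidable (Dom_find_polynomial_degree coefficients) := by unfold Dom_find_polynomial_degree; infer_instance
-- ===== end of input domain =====

-- B replaces A's back-to-front negative-index trailing-zero counter and len-1-reduce
-- subtraction with a single forward scan that remembers the last non-zero index (objective: simpler).

-- ===== PORT A =====
-- A's loop: for i in range(len(cs)): if cs[-1-i]==0: reduce+=1 else: break
-- pvAReduce cs i = the total added to `reduce` from iteration i on (break = stop).
def pvAReduce (cs : List Int) (i : Nat) : Int :=
  if _h : i < cs.length then
    match PySem.List.pyGet? cs (-1 - (i : Int)) with
    | some c => if c = 0 then 1 + pvAReduce cs (i + 1) else 0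
    | none => 0   -- unreachable: index -1-i is in range for i < len
  else 0
termination_by cs.length - i

def find_polynomial_degree (coefficients : List Int) : Int :=
  (coefficients.length : Int) - 1 - pvAReduce coefficients 0

-- ===== PORT B =====
def find_polynomial_degree_alt (coefficients : List Int) : Int :=
  (PySem.List.enumerate coefficients 0).foldl
    (fun degree p => if p.2 ≠ 0 then p.1 else degree) (-1)

-- ===== PRECONDITION & SPEC =====
def Spec_find_polynomial_degree (coefficients : List Int) (out : Int) : Prop := out = find_polynomial_degree_alt coefficients
instance (coefficients : List Int) (out : Int) : Decidable (Spec_find_polynomial_degree coefficients out) := by unfold Spec_find_polynomial_degree; infer_instance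

-- ===== CLAIM (what is proved, stated in full; the proofs are below) =====
def Claim_equal_find_polynomial_degree : Prop := ∀ (coefficients : List Int), Dom_find_polynomial_degree coefficients → Spec_find_polynomial_degree coefficients (find_polynomial_degree coefficients)

-- ===== LEMMAS AND PROOFS =====

-- shifting the start index by one over a list extended on the right changes nothing
theorem pvAReduce_shift (ys : List Int) (y : Int) :
    ∀ i, pvAReduce (ys ++ [y]) (i + 1) = pvAReduce ys i := by
  intro i
  induction hn : ys.length - i using Nat.strong_induction_on generalizing i with
  | _ n ih =>
    by_cases h : i < ys.length
    · have h1 : i + 1 < (ys ++ [y]).length := by simp; omega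
      have e1 : (-1 : Int) - ((i + 1 : Nat) : Int) = -(((i + 2 : Nat)) : Int) := by push_cast; ring
      have e2 : (-1 : Int) - ((i : Nat) : Int) = -(((i + 1 : Nat)) : Int) := by push_cast; ring
      rw [pvAReduce]
      conv_rhs => rw [pvAReduce]
      rw [dif_pos h1, dif_pos h, e1, e2,
        PySem.List.pyGet?_neg_natCast _ _ (by omega) (by simp; omega),
        PySem.List.pyGet?_neg_natCast _ _ (by omega) (by omega)]
      have e3 : (ys ++ [y]).length - (i + 2) = ys.length - (i + 1) := by simp
      rw [e3, List.getElem?_append_left (by omega)]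
      cases hc : ys[ys.length - (i + 1)]? with
      | none => rfl
      | some c =>
        by_cases hz : c = 0
        · simp only [hz, if_true]
          rw [ih (ys.length - (i + 1)) (by omega) (i + 1) rfl]
        · simp [hz]
    · rw [pvAReduce]
      conv_rhs => rw [pvAReduce]
      rw [dif_neg (by simp; omega), dif_neg h]

theorem portA_concat (ys : List Int) (y : Int) :
    find_polynomial_degree (ys ++ [y]) =
      if y = 0 then find_polynomial_degree ys else (ys.length : Int) := by
  unfold find_polynomial_degree
  rw [pvAReduce, dif_pos (by simp)]
  have : PySem.List.pyGet? (ys ++ [y]) (-1 - ((0 : Nat) : Int)) = some y := by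
    simp [PySem.List.pyGet?_neg_one_append_singleton]
  rw [this]
  show ((((ys ++ [y]).length : Int) - 1 -
      if y = 0 then 1 + pvAReduce (ys ++ [y]) (0 + 1) else 0) = _)
  by_cases hz : y = 0
  · rw [if_pos hz, if_pos hz, pvAReduce_shift ys y 0]
    simp; ring
  · rw [if_neg hz, if_neg hz]
    simp

theorem portB_concat (ys : List Int) (y : Int) :
    find_polynomial_degree_alt (ys ++ [y]) =
      if y = 0 then find_polynomial_degree_alt ys else (ys.length : Int) := by
  unfold find_polynomial_degree_alt
  rw [PySem.List.enumerate_append, List.foldl_append]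
  simp only [PySem.List.enumerate_cons, PySem.List.enumerate_nil, List.foldl_cons, List.foldl_nil]
  by_cases hz : y = 0 <;> simp [hz]

theorem ports_agree (cs : List Int) :
    find_polynomial_degree cs = find_polynomial_degree_alt cs := by
  induction cs using List.reverseRecOn with
  | nil =>
    unfold find_polynomial_degree find_polynomial_degree_alt pvAReduce
    simp [PySem.List.enumerate_nil]
  | append_singleton ys y ih =>
    rw [portA_concat, portB_concat, ih]

-- ===== VERDICT (by name: the statement is the Claim_ definition above) =====
theorem find_polynomial_degree_spec : Claim_equal_find_polynomial_degree := by
  intro cs _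
  exact ports_agree cs
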